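-- pv_equiv track=rewrite | github.com/ApocalypseMac/LeetCode | Contest/LCCUP2020_P/2-早餐组合.py | breakfastNumber
-- ===== SOURCE A (Python) =====
-- from typing import List
--
-- def breakfastNumber(staple: List[int], drinks: List[int], x: int) -> int:
--     staple.sort()
--     drinks.sort()
--     m, n = len(staple), len(drinks)
--     res = 0
--     r = n - 1
--     for l in range(m):
--         temp = staple[l]
--         while r >= 0 and drinks[r] + temp > x:
--             r -= 1
--         res += r + 1
--         res %= 10 ** 9 + 7
--     return res
-- ===== SOURCE B (Python) =====
-- from bisect import bisect_right
-- from typing import List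
--
-- def breakfastNumber(staple: List[int], drinks: List[int], x: int) -> int:
--     staple.sort()
--     drinks.sort()
--     total = 0
--     for s in staple:
--         total += bisect_right(drinks, x - s)
--     return total % (10 ** 9 + 7)
-- ===== Notes on version B (the rewrite author's own statement) =====
-- stated objective: idiomatic
-- what changed: Replaces the coordinated decreasing two-pointer sweep with an independent bisect_right binary search per staple on the sorted drinks, summing the counts and taking the modulus once at the end.
import Mathlib
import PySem

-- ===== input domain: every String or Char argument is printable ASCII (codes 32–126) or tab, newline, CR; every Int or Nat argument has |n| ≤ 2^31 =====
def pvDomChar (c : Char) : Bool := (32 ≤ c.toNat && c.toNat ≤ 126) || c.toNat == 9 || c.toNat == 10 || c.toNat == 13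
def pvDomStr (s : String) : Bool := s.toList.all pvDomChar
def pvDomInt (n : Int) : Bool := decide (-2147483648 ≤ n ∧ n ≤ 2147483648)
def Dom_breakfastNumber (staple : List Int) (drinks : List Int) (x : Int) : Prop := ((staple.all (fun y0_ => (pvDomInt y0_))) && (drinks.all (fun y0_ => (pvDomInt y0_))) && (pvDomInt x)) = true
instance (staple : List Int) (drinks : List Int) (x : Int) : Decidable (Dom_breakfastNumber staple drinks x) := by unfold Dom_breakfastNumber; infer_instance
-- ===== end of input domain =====

-- B replaces A's two-pointer sweep with an independent bisect_right per staple (same cost class; both sort their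
-- arguments in place in Python — the equivalence proved here is about the return value, the mutation is identical).


-- ===== PORT A =====
-- 'while r >= 0 and drinks[r] + temp > x: r -= 1' (the 'none' branch is unreachable: every call keeps r < len(dr))
def pvWhileA (dr : List Int) (temp x : Int) (r : Int) : Int :=
  if _h : 0 ≤ r then
    match PySem.List.pyGet? dr r with
    | some d => if d + temp > x then pvWhileA dr temp x (r - 1) else r
    | none => r
  else r
termination_by (r + 1).toNat
decreasing_by omega

def breakfastNumber (staple : List Int) (drinks : List Int) (x : Int) : Int :=
  let st := PySem.List.sorted staple (fun v => v)
  let dr := PySem.List.sorted drinks (fun v => v)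
  let n : Int := dr.length
  (st.foldl (fun (p : Int × Int) temp =>
      let r := pvWhileA dr temp x p.2
      (PySem.Int.mod (p.1 + (r + 1)) (10 ^ 9 + 7), r)) (0, n - 1)).1

-- ===== PORT B =====
def breakfastNumber_alt (staple : List Int) (drinks : List Int) (x : Int) : Int :=
  let st := PySem.List.sorted staple (fun v => v)
  let dr := PySem.List.sorted drinks (fun v => v)
  PySem.Int.mod
    (st.foldl (fun acc s => acc + (PySem.List.bisectRight dr (x - s) : Int)) 0)
    (10 ^ 9 + 7)

-- ===== PRECONDITION & SPEC =====
def Spec_breakfastNumber (staple : List Int) (drinks : List Int) (x : Int) (out : Int) : Prop := out = breakfastNumber_alt staple drinks x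
instance (staple : List Int) (drinks : List Int) (x : Int) (out : Int) : Decidable (Spec_breakfastNumber staple drinks x out) := by unfold Spec_breakfastNumber; infer_instance

-- ===== CLAIM (what is proved, stated in full; the proofs are below) =====
def Claim_equal_breakfastNumber : Prop := ∀ (staple : List Int) (drinks : List Int) (x : Int), Dom_breakfastNumber staple drinks x → Spec_breakfastNumber staple drinks x (breakfastNumber staple drinks x)

-- ===== LEMMAS AND PROOFS =====

-- bisect_right is monotone in the query value on a sorted list
theorem pvBisect_mono (dr : List Int) (hdr : dr.Pairwise (· ≤ ·)) (v w : Int) (hvw : v ≤ w) :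
    PySem.List.bisectRight dr v ≤ PySem.List.bisectRight dr w := by
  by_contra h
  rw [Nat.not_le] at h
  obtain ⟨hlenv, hlev, hgtv⟩ := PySem.List.bisectRight_spec dr v hdr
  obtain ⟨hlenw, hlew, hgtw⟩ := PySem.List.bisectRight_spec dr w hdr
  have hj : PySem.List.bisectRight dr v - 1 < dr.length := by omega
  have h1 := hlev (PySem.List.bisectRight dr v - 1) hj (by omega)
  have h2 := hgtw (PySem.List.bisectRight dr v - 1) hj (by omega)
  omega

-- A's inner while loop lands exactly at bisect_right(dr, x - temp) - 1
theorem pvWhileA_eq (dr : List Int) (temp x : Int) (hdr : dr.Pairwise (· ≤ ·)) :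
    ∀ (k : Nat) (r : Int), (r + 1).toNat = k → -1 ≤ r → r ≤ (dr.length : Int) - 1 →
    ((PySem.List.bisectRight dr (x - temp) : Int)) ≤ r + 1 →
    pvWhileA dr temp x r = (PySem.List.bisectRight dr (x - temp) : Int) - 1 := by
  intro k
  induction k using Nat.strong_induction_on with
  | _ k ih =>
    intro r hk h1 h2 hb
    obtain ⟨hlen, hle, hgt⟩ := PySem.List.bisectRight_spec dr (x - temp) hdr
    rw [pvWhileA]
    by_cases hr : 0 ≤ r
    · have hrn : r = ((r.toNat : Nat) : Int) := by omega
      have hrlt : r.toNat < dr.length := by omega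
      have hget : PySem.List.pyGet? dr r = some dr[r.toNat] := by
        have h0 : PySem.List.pyGet? dr r = dr[r.toNat]? := by
          rw [hrn, PySem.List.pyGet?_natCast, Int.toNat_natCast]
        rw [h0, List.getElem?_eq_getElem hrlt]
      rw [dif_pos hr, hget]
      show (if dr[r.toNat] + temp > x then pvWhileA dr temp x (r - 1) else r)
          = (PySem.List.bisectRight dr (x - temp) : Int) - 1
      by_cases hd : dr[r.toNat] + temp > x
      · rw [if_pos hd]
        have hble : (PySem.List.bisectRight dr (x - temp) : Int) ≤ r := by
          by_contra hc
          rw [Int.not_le] at hc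
          have := hle r.toNat hrlt (by omega)
          omega
        exact ih (r.toNat) (by omega) (r - 1) (by omega) (by omega) (by omega) (by omega)
      · rw [if_neg hd]
        have : ¬ (PySem.List.bisectRight dr (x - temp) ≤ r.toNat) := by
          intro hc
          have := hgt r.toNat hrlt hc
          omega
        omega
    · rw [dif_neg hr]
      omega

-- the main loop invariant: A's (res, r) fold computes the per-step-mod sum of the bisect counts
theorem pvLoopA_eq (dr : List Int) (x : Int) (hdr : dr.Pairwise (· ≤ ·)) :
    ∀ (st : List Int), st.Pairwise (· ≤ ·) → ∀ (res r : Int),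
    res % (10 ^ 9 + 7) = res → -1 ≤ r → r ≤ (dr.length : Int) - 1 →
    (∀ t ∈ st, (PySem.List.bisectRight dr (x - t) : Int) ≤ r + 1) →
    (st.foldl (fun (p : Int × Int) temp =>
        (PySem.Int.mod (p.1 + (pvWhileA dr temp x p.2 + 1)) (10 ^ 9 + 7), pvWhileA dr temp x p.2)) (res, r)).1
      = (res + (st.map (fun s => (PySem.List.bisectRight dr (x - s) : Int))).sum) % (10 ^ 9 + 7) := by
  intro st
  induction st with
  | nil => intro _ res r hres _ _ _; simpa using hres.symm
  | cons s st ihs =>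
    intro hsort res r hres h1 h2 hb
    rw [List.pairwise_cons] at hsort
    have hbs : (PySem.List.bisectRight dr (x - s) : Int) ≤ r + 1 := hb s (by simp)
    have hw : pvWhileA dr s x r = (PySem.List.bisectRight dr (x - s) : Int) - 1 :=
      pvWhileA_eq dr s x hdr (r + 1).toNat r rfl h1 h2 hbs
    obtain ⟨hlen, -, -⟩ := PySem.List.bisectRight_spec dr (x - s) hdr
    simp only [List.foldl_cons, hw]
    have hmod : PySem.Int.mod (res + ((PySem.List.bisectRight dr (x - s) : Int) - 1 + 1)) (10 ^ 9 + 7)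
        = (res + (PySem.List.bisectRight dr (x - s) : Int)) % (10 ^ 9 + 7) := by
      rw [PySem.Int.mod_eq_emod_of_pos (by norm_num)]; ring_nf
    rw [hmod, ihs hsort.2 _ _ (Int.emod_emod_of_dvd _ dvd_rfl) (by omega) (by omega) ?_]
    · rw [List.map_cons, List.sum_cons, Int.emod_add_emod]; ring_nf
    · intro t ht
      have hcast : (PySem.List.bisectRight dr (x - t) : Nat) ≤ PySem.List.bisectRight dr (x - s) :=
        pvBisect_mono dr hdr (x - t) (x - s) (by have := hsort.1 t ht; omega)
      omega

-- ===== VERDICT (by name: the statement is the Claim_ definition above) =====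
theorem breakfastNumber_spec : Claim_equal_breakfastNumber := by
  intro staple drinks x _
  unfold Spec_breakfastNumber breakfastNumber breakfastNumber_alt
  have hdr : (PySem.List.sorted drinks (fun v => v)).Pairwise (· ≤ ·) :=
    PySem.List.sorted_pairwise drinks (fun v => v)
  have hst : (PySem.List.sorted staple (fun v => v)).Pairwise (· ≤ ·) :=
    PySem.List.sorted_pairwise staple (fun v => v)
  have hB : ∀ t ∈ PySem.List.sorted staple (fun v => v),
      (PySem.List.bisectRight (PySem.List.sorted drinks (fun v => v)) (x - t) : Int)
        ≤ ((PySem.List.sorted drinks (fun v => v)).length : Int) - 1 + 1 := by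
    intro t _
    obtain ⟨hlen, -, -⟩ :=
      PySem.List.bisectRight_spec (PySem.List.sorted drinks (fun v => v)) (x - t) hdr
    omega
  rw [pvLoopA_eq (PySem.List.sorted drinks (fun v => v)) x hdr
      (PySem.List.sorted staple (fun v => v)) hst 0
      (((PySem.List.sorted drinks (fun v => v)).length : Int) - 1) (by norm_num)
      (by omega) (by omega) hB]
  simp only [PySem.List.foldl_add]
  rw [PySem.Int.mod_eq_emod_of_pos (show (0:Int) < 10 ^ 9 + 7 by norm_num)]
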